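-- pv_equiv track=rewrite | github.com/ck999kk/For-report- | Desktop/WORK/professional_investigators_cybertrace/src/cybertrace/metadata_analyzer.py | _extract_camera_from_exif
-- ===== SOURCE A (Python) =====
-- from typing import Dict, Any, List, Optional
--
-- def _extract_camera_from_exif(exif_data: Dict[str, Any]) -> Dict[str, Any]:
--     """Extract camera data from EXIF"""
--
--     camera_data = {}
--
--     camera_keys = [
--         'Make', 'Model', 'Camera Model Name', 'Lens Model', 'Lens Info',
--         'Focal Length', 'F Number', 'Exposure Time', 'ISO', 'Flash',
--         'White Balance', 'Exposure Mode', 'Scene Type'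
--     ]
--
--     for key in camera_keys:
--         if key in exif_data:
--             camera_data[key] = exif_data[key]
--
--     return camera_data
-- ===== SOURCE B (Python) =====
-- _CAMERA_KEYS = (
--     'Make', 'Model', 'Camera Model Name', 'Lens Model', 'Lens Info',
--     'Focal Length', 'F Number', 'Exposure Time', 'ISO', 'Flash',
--     'White Balance', 'Exposure Mode', 'Scene Type'
-- )
--
-- _CAMERA_INDEX = {k: i for i, k in enumerate(_CAMERA_KEYS)}
--
--
-- def _extract_camera_from_exif(exif_data):
--     """Extract camera data from EXIF"""
--     hits = [(k, v) for k, v in exif_data.items() if k in _CAMERA_INDEX]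
--     hits.sort(key=lambda kv: _CAMERA_INDEX[kv[0]])
--     return dict(hits)
-- ===== Notes on version B (the rewrite author's own statement) =====
-- stated objective: alternative
-- what changed: B replaces A's 13 probes of the EXIF dict (one per fixed camera key) by a single filtering pass over exif_data.items() against a precomputed key->rank index, then sorts the few hits by rank to restore the canonical key order.
import Mathlib
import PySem

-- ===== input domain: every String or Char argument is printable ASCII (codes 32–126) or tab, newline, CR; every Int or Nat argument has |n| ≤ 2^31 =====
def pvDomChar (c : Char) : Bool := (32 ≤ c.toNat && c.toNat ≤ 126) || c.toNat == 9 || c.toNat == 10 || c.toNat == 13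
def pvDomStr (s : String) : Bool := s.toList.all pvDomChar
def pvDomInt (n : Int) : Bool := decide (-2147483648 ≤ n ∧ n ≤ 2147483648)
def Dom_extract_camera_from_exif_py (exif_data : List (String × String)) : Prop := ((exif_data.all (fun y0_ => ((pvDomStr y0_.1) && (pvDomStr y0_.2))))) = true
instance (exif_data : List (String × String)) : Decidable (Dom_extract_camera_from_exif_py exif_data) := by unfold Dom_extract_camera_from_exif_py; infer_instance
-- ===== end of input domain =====

-- B scans the EXIF items once against a precomputed key→rank index and sorts the hits by rank,
-- instead of A's probing the dict for each of the 13 fixed keys; objective: alternative (same output).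

-- the fixed list of camera keys (the shared literal of both Python versions)
def pvCameraKeys : List String :=
  ["Make", "Model", "Camera Model Name", "Lens Model", "Lens Info",
   "Focal Length", "F Number", "Exposure Time", "ISO", "Flash",
   "White Balance", "Exposure Mode", "Scene Type"]

-- ===== PORT A =====
def extract_camera_from_exif_py (exif_data : List (String × String)) : List (String × String) :=
  let d := PySem.Dict.ofList exif_data
  -- for key in camera_keys: if key in exif_data: camera_data[key] = exif_data[key]
  let camera_data := pvCameraKeys.foldl
    (fun cd key => if d.contains key then cd.insert key (d.getD key "") else cd)
    PySem.Dict.empty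
  camera_data.items

-- ===== PORT B =====
-- _CAMERA_INDEX = {k: i for i, k in enumerate(_CAMERA_KEYS)}
def pvCameraIndex : PySem.Dict String Int :=
  PySem.Dict.ofList ((PySem.List.enumerate pvCameraKeys).map (fun p => (p.2, p.1)))

def extract_camera_from_exif_py_alt (exif_data : List (String × String)) : List (String × String) :=
  let d := PySem.Dict.ofList exif_data
  -- hits = [(k, v) for k, v in exif_data.items() if k in _CAMERA_INDEX]
  let hits := d.items.filter (fun kv => pvCameraIndex.contains kv.1)
  -- hits.sort(key=lambda kv: _CAMERA_INDEX[kv[0]])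
  let sortedHits := PySem.List.sorted hits (fun kv => pvCameraIndex.getD kv.1 0) false
  -- return dict(hits)
  (PySem.Dict.ofList sortedHits).items

-- ===== PRECONDITION & SPEC =====
def Spec_extract_camera_from_exif_py (exif_data : List (String × String)) (out : List (String × String)) : Prop := out = extract_camera_from_exif_py_alt exif_data
instance (exif_data : List (String × String)) (out : List (String × String)) : Decidable (Spec_extract_camera_from_exif_py exif_data out) := by unfold Spec_extract_camera_from_exif_py; infer_instance

-- ===== CLAIM (what is proved, stated in full; the proofs are below) =====
def Claim_equal_extract_camera_from_exif_py : Prop := ∀ (exif_data : List (String × String)), Dom_extract_camera_from_exif_py exif_data → Spec_extract_camera_from_exif_py exif_data (extract_camera_from_exif_py exif_data)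

-- ===== LEMMAS AND PROOFS =====

-- the common value: camera keys present in d, in camera-key order, paired with their values
def pvCanon (d : PySem.Dict String String) : List (String × String) :=
  (pvCameraKeys.filter (fun k => d.contains k)).map (fun k => (k, d.getD k ""))

lemma pvCameraKeys_nodup : pvCameraKeys.Nodup := by decide

lemma pvOfList_eq_foldl {κ ν : Type} [BEq κ] (pairs : List (κ × ν)) :
    PySem.Dict.ofList pairs = pairs.foldl (fun d p => d.insert p.1 p.2) PySem.Dict.empty := by
  simp [PySem.Dict.ofList, PySem.Dict.update]

lemma pvItems_ofList_of_nodup {κ ν : Type} [BEq κ] [LawfulBEq κ] (pairs : List (κ × ν))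
    (h : (pairs.map Prod.fst).Nodup) : (PySem.Dict.ofList pairs).items = pairs := by
  rw [pvOfList_eq_foldl]
  have := PySem.Dict.items_foldl_insert_fresh (l := pairs) (k := Prod.fst) (v := Prod.snd)
    (d := (PySem.Dict.empty : PySem.Dict κ ν)) (by intro a _; exact PySem.Dict.contains_empty _) h
  simpa using this

lemma pvCameraIndex_contains (k : String) :
    pvCameraIndex.contains k = decide (k ∈ pvCameraKeys) := by
  rw [PySem.Dict.contains_eq_decide_mem_keys]
  have hk : pvCameraIndex.keys = pvCameraKeys := by decide
  rw [hk]

lemma pvCameraIndex_pairwise :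
    pvCameraKeys.Pairwise (fun a b => pvCameraIndex.getD a 0 < pvCameraIndex.getD b 0) := by decide

-- A's loop produces exactly the canonical list
lemma pvA_eq_canon (d : PySem.Dict String String) :
    (pvCameraKeys.foldl
      (fun cd key => if d.contains key then cd.insert key (d.getD key "") else cd)
      PySem.Dict.empty).items = pvCanon d := by
  rw [PySem.List.foldl_if_eq_foldl_filter]
  have := PySem.Dict.items_foldl_insert_fresh
    (l := pvCameraKeys.filter (fun k => d.contains k))
    (k := fun k => k) (v := fun k => d.getD k "")
    (d := (PySem.Dict.empty : PySem.Dict String String))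
    (by intro a _; exact PySem.Dict.contains_empty _)
    (by simpa using pvCameraKeys_nodup.filter _)
  simpa [pvCanon] using this

-- B's filtered hits are a permutation of the canonical list
lemma pvCanon_perm_hits (d : PySem.Dict String String) (hnd : d.keys.Nodup) :
    (pvCanon d).Perm (d.items.filter (fun kv => pvCameraIndex.contains kv.1)) := by
  have hitems_nodup : d.items.Nodup := hnd.of_map
  have hcanon_nodup : (pvCanon d).Nodup := by
    refine ((pvCameraKeys_nodup.filter _).map ?_)
    intro a b hab
    simpa using congrArg Prod.fst hab
  rw [List.perm_ext_iff_of_nodup hcanon_nodup (hitems_nodup.filter _)]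
  intro p
  constructor
  · intro hp
    rcases List.mem_map.mp hp with ⟨k, hk, rfl⟩
    rcases List.mem_filter.mp hk with ⟨hmem, hcont⟩
    have hsome : d.get? k = some (d.getD k "") := by
      rw [PySem.Dict.contains_eq_isSome_get?] at hcont
      rcases Option.isSome_iff_exists.mp hcont with ⟨v, hv⟩
      simp [PySem.Dict.getD_eq_get?_getD, hv]
    refine List.mem_filter.mpr ⟨PySem.Dict.mem_items_of_get?_eq_some d hsome, ?_⟩
    simpa [pvCameraIndex_contains] using hmem
  · intro hp
    rcases List.mem_filter.mp hp with ⟨hmem, hcont⟩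
    have hget : d.get? p.1 = some p.2 := by
      have : (p.1, p.2) ∈ d.items := by simpa using hmem
      exact PySem.Dict.get?_of_mem_items d this hnd
    have hc : d.contains p.1 = true := by
      rw [PySem.Dict.contains_eq_isSome_get?, hget]; rfl
    have hgd : d.getD p.1 "" = p.2 := by simp [PySem.Dict.getD_eq_get?_getD, hget]
    have hkmem : p.1 ∈ pvCameraKeys := by
      simpa [pvCameraIndex_contains] using hcont
    refine List.mem_map.mpr ⟨p.1, List.mem_filter.mpr ⟨hkmem, hc⟩, ?_⟩
    rw [hgd]
lemma pvCanon_pairwise (d : PySem.Dict String String) :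
    (pvCanon d).Pairwise
      (fun a b => pvCameraIndex.getD a.1 0 < pvCameraIndex.getD b.1 0) := by
  exact List.pairwise_map.mpr (pvCameraIndex_pairwise.sublist List.filter_sublist)

lemma pvCanon_fst_nodup (d : PySem.Dict String String) :
    ((pvCanon d).map Prod.fst).Nodup := by
  have : (pvCanon d).map Prod.fst = pvCameraKeys.filter (fun k => d.contains k) := by
    rw [pvCanon, List.map_map,
      show (Prod.fst ∘ fun k => (k, d.getD k "")) = id from rfl, List.map_id]
  rw [this]
  exact pvCameraKeys_nodup.filter _

-- ===== VERDICT (by name: the statement is the Claim_ definition above) =====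
theorem extract_camera_from_exif_py_spec : Claim_equal_extract_camera_from_exif_py := by
  intro exif_data _
  unfold Spec_extract_camera_from_exif_py
  unfold extract_camera_from_exif_py extract_camera_from_exif_py_alt
  set d := PySem.Dict.ofList exif_data with hd
  have hnd : d.keys.Nodup := PySem.Dict.nodup_keys_ofList exif_data
  have hsorted :
      PySem.List.sorted (d.items.filter (fun kv => pvCameraIndex.contains kv.1))
        (fun kv => pvCameraIndex.getD kv.1 0) false = pvCanon d :=
    PySem.List.sorted_eq_of_perm_of_pairwise_lt _ _ _ (pvCanon_perm_hits d hnd) (pvCanon_pairwise d)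
  simp only [hsorted, pvA_eq_canon d, pvItems_ofList_of_nodup _ (pvCanon_fst_nodup d)]
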